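-- pv_equiv track=rewrite | github.com/Amandha18/cs50p-problem-sets | ProblemSet2/plates.py | middle_numbers
-- ===== SOURCE A (Python) =====
-- def middle_numbers(s):
--     isNum = False
--     letter_after = False
--     for char in s:
--         if char.isdigit():
--             isNum = True
--             digit_place = s.index(char) # find where the digit starts
--             for j in s[digit_place:]: # check for letters that come after the digit
--                 if j.isalpha():
--                     letter_after = True
--             break
--
--     if letter_after and isNum:
--         return True
--     return False
-- ===== SOURCE B (Python) =====
-- def middle_numbers(s):
--     seen_digit = False
--     for char in s:
--         if char.isdigit():
--             seen_digit = True
--         elif char.isalpha() and seen_digit: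
--             return True
--     return False
-- ===== Notes on version B (the rewrite author's own statement) =====
-- stated objective: simpler
-- what changed: Replaced A's outer scan plus s.index lookup plus inner suffix scan with a single stateful left-to-right pass keeping one seen_digit flag and returning early on the first letter after a digit.
import Mathlib
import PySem

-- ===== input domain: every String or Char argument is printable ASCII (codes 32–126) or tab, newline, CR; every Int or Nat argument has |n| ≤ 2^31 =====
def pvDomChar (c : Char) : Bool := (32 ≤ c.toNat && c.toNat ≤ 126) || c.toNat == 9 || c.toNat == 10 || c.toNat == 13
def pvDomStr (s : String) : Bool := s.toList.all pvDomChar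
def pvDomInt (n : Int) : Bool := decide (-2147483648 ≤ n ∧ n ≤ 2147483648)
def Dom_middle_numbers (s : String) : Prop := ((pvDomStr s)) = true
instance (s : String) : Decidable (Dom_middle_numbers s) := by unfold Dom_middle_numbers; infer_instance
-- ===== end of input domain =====

-- B replaces A's outer-scan-plus-s.index-plus-suffix-scan with one single stateful left-to-right pass (objective: simpler).

-- ===== PORT A =====
-- inner loop body: 'if j.isalpha(): letter_after = True'
def pvAInner (acc : Bool) (c : Char) : Bool := if PySem.Chars.isalpha c then true else acc

-- outer 'for char in s: …; break', carrying the whole string cs for s.index / the slice;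
-- s.index(char) cannot raise here (char was taken from s), so .getD 0 is unreachable
def pvALoop (cs : List Char) : List Char → Bool × Bool
  | [] => (false, false)
  | c :: rest =>
    if PySem.Chars.isdigit c then
      let digit_place := (PySem.List.index? cs c).getD 0
      let letter_after := (PySem.List.slice cs (some ((digit_place : Nat) : Int)) none).foldl pvAInner false
      (true, letter_after)
    else pvALoop cs rest

def middle_numbers (s : String) : Bool :=
  let st := pvALoop s.toList s.toList
  st.2 && st.1

-- ===== PORT B =====
def pvBLoop : List Char → Bool → Bool
  | [], _ => false
  | c :: rest, seen =>
    if PySem.Chars.isdigit c then pvBLoop rest true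
    else if PySem.Chars.isalpha c && seen then true
    else pvBLoop rest seen

def middle_numbers_alt (s : String) : Bool := pvBLoop s.toList false

-- ===== PRECONDITION & SPEC =====
def Spec_middle_numbers (s : String) (out : Bool) : Prop := out = middle_numbers_alt s
instance (s : String) (out : Bool) : Decidable (Spec_middle_numbers s out) := by unfold Spec_middle_numbers; infer_instance

-- ===== CLAIM (what is proved, stated in full; the proofs are below) =====
def Claim_equal_middle_numbers : Prop := ∀ (s : String), Dom_middle_numbers s → Spec_middle_numbers s (middle_numbers s)

-- ===== LEMMAS AND PROOFS =====

theorem pv_digit_not_alpha (c : Char) (h : PySem.Chars.isdigit c = true) :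
    PySem.Chars.isalpha c = false := by
  simp [PySem.Chars.isdigit, PySem.Chars.isalpha, PySem.Chars.isupper, PySem.Chars.islower] at *
  obtain ⟨h1, h2⟩ := h
  constructor <;> intro hle
  · exact absurd (le_trans hle h2) (by decide)
  · exact absurd (le_trans hle h2) (by decide)

theorem pv_bloop_true (cs : List Char) :
    pvBLoop cs true = cs.any PySem.Chars.isalpha := by
  induction cs with
  | nil => rfl
  | cons c rest ih =>
    by_cases hd : PySem.Chars.isdigit c = true
    · simp [pvBLoop, hd, ih, pv_digit_not_alpha c hd]
    · by_cases ha : PySem.Chars.isalpha c = true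
      · simp [pvBLoop, hd, ha]
      · simp [pvBLoop, hd, ha, ih]

theorem pv_foldl_inner (cs : List Char) (acc : Bool) :
    cs.foldl pvAInner acc = (acc || cs.any PySem.Chars.isalpha) := by
  induction cs generalizing acc with
  | nil => simp
  | cons c rest ih =>
    by_cases ha : PySem.Chars.isalpha c = true
    · simp [pvAInner, ha, ih]
    · simp [pvAInner, ha, ih]

theorem pv_index_append (pre rest : List Char) (c : Char) (hc : c ∉ pre) :
    PySem.List.index? (pre ++ c :: rest) c = some pre.length := by
  induction pre with
  | nil => simpa using PySem.List.index?_cons_self c rest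
  | cons p ps ih =>
    have hne : p ≠ c := fun h => hc (h ▸ List.mem_cons_self)
    have : PySem.List.index? ((p :: ps) ++ c :: rest) c
        = (PySem.List.index? (ps ++ c :: rest) c).map (· + 1) :=
      PySem.List.index?_cons_of_ne (ps ++ c :: rest) hne
    rw [this, ih (fun h => hc (List.mem_cons_of_mem p h))]
    rfl

theorem pv_main (l pre : List Char) (hpre : ∀ x ∈ pre, PySem.Chars.isdigit x = false) :
    ((pvALoop (pre ++ l) l).2 && (pvALoop (pre ++ l) l).1) = pvBLoop l false := by
  induction l generalizing pre with
  | nil => simp [pvALoop, pvBLoop]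
  | cons c rest ih =>
    by_cases hd : PySem.Chars.isdigit c = true
    · have hc : c ∉ pre := fun hmem => by simp [hpre c hmem] at hd
      have hidx := pv_index_append pre rest c hc
      have hslice : PySem.List.slice (pre ++ c :: rest) (some ((pre.length : Nat) : Int)) none
          = c :: rest := by
        rw [PySem.List.slice_from_natCast]
        exact List.drop_left
      simp only [pvALoop, hd, if_pos, hidx, Option.getD_some, hslice]
      rw [pv_foldl_inner]
      simp [pvBLoop, hd, pv_bloop_true, pv_digit_not_alpha c hd]
    · have step : pvALoop (pre ++ c :: rest) (c :: rest)
          = pvALoop (pre ++ c :: rest) rest := by simp [pvALoop, hd]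
      have hpre' : ∀ x ∈ pre ++ [c], PySem.Chars.isdigit x = false := by
        intro x hx
        rcases List.mem_append.mp hx with h | h
        · exact hpre x h
        · simp at h; subst h; exact eq_false_of_ne_true hd
      have := ih (pre ++ [c]) hpre'
      rw [List.append_assoc] at this
      simp only [List.singleton_append] at this
      rw [step, this]
      simp [pvBLoop, hd]

-- ===== VERDICT (by name: the statement is the Claim_ definition above) =====
theorem middle_numbers_spec : Claim_equal_middle_numbers := by
  intro s _
  unfold Spec_middle_numbers middle_numbers middle_numbers_alt
  simpa using pv_main s.toList [] (by simp)
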